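-- pv_equiv track=rewrite | github.com/harryhuayuanchong/research | binius/utils.py | evaluation_tensor_product
-- ===== SOURCE A (Python) =====
-- class Vector():
--     def __init__(self, values):
--         self.values = values
--
--     def __add__(self, other):
--         return Vector([v+w for v,w in zip(self.values, other.values)])
--
--     def __mul__(self, other):
--         return Vector([v*other for v in self.values])
--
--     def __div__(self, other):
--         return Vector([v/other for v in self.values])
--
--     def __iter__(self):
--         for value in self.values:
--             yield value
--
--     def to_bytes(self, length, byteorder):
--         return b''.join([v.to_bytes(length, byteorder) for v in self.values])
--
--     def __repr__(self):
--         return repr(self.values)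
--
--     def __eq__(self, other):
--         return self.values == other.values
--
-- def get_class(arg, start=int):
--     if isinstance(arg, (list, tuple, Vector)):
--         output = start
--         for a in arg:
--             output = get_class(a, output)
--         return output
--     elif start == int:
--         return arg.__class__
--     elif arg.__class__ == int:
--         return start
--     elif start == arg.__class__:
--         return arg.__class__
--     else:
--         raise Exception("Incompatible classes: {} {}".format(start, arg.__class__))
--
-- def spread_type(arg, cls):
--     if isinstance(arg, cls):
--         return arg
--     elif isinstance(arg, int):
--         return cls(arg)
--     elif isinstance(arg, (list, tuple, Vector)):
--         return arg.__class__([spread_type(item, cls) for item in arg])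
--     else:
--         raise Exception("Type propagation of {} hit incompatible element: {}".format(cls, arg))
--
-- def enforce_type_compatibility(*args):
--     cls = get_class(args)
--     return tuple([cls] + list(spread_type(arg, cls) for arg in args))
--
-- def evaluation_tensor_product(pt):
--     cls, pt = enforce_type_compatibility(pt)
--     o = [cls(1)]
--     for coord in pt:
--         o = [
--             (cls(1) - coord) * v for v in o
--         ] + [
--             coord * v for v in o
--         ]
--     return o
-- ===== SOURCE B (Python) =====
-- def evaluation_tensor_product(pt):
--     pts = list(pt)
--     n = len(pts)
--     out = []
--     for i in range(1 << n):
--         prod = 1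
--         for j in range(n):
--             prod = prod * (pts[j] if (i >> j) & 1 else 1 - pts[j])
--         out.append(prod)
--     return out
-- ===== Notes on version B (the rewrite author's own statement) =====
-- stated objective: alternative
-- what changed: Each output entry is computed independently from the binary expansion of its index (LSB = first coordinate), instead of doubling the list coordinate by coordinate.
import Mathlib
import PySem

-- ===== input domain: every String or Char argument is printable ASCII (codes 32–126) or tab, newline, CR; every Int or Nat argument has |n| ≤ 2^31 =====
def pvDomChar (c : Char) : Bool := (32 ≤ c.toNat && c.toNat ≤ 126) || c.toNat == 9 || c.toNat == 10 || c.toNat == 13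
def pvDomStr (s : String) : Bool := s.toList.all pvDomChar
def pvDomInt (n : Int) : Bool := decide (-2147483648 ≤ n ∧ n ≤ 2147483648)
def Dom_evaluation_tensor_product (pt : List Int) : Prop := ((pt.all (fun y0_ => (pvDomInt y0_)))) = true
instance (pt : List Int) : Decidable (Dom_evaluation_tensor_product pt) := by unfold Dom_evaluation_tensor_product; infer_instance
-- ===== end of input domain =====

-- B computes each tensor-product entry independently from the binary expansion of its index
-- (LSB = first coordinate) instead of doubling the list coordinate by coordinate (objective: alternative).


-- ===== PORT A =====
-- enforce_type_compatibility on a list of ints yields cls = int and pt unchanged, so it is the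
-- identity here; cls(1) is the integer 1. The loop body is transliterated step for step.
def tpStep (o : List Int) (coord : Int) : List Int :=
  o.map (fun v => (1 - coord) * v) ++ o.map (fun v => coord * v)

def evaluation_tensor_product (pt : List Int) : List Int :=
  pt.foldl tpStep [(1 : Int)]

-- ===== PORT B =====
-- inner loop of Source B: prod = prod * (pts[j] if (i >> j) & 1 else 1 - pts[j]) over j in range(n)
def tpProd (pts : List Int) (i : Nat) : Int :=
  (List.range pts.length).foldl
    (fun prod j => prod * (if (i >>> j) &&& 1 == 1 then pts.getD j 0 else 1 - pts.getD j 0)) 1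

def evaluation_tensor_product_alt (pt : List Int) : List Int :=
  (List.range (1 <<< pt.length)).map (fun i => tpProd pt i)

-- ===== PRECONDITION & SPEC =====
def Spec_evaluation_tensor_product (pt : List Int) (out : List Int) : Prop := out = evaluation_tensor_product_alt pt
instance (pt : List Int) (out : List Int) : Decidable (Spec_evaluation_tensor_product pt out) := by unfold Spec_evaluation_tensor_product; infer_instance

-- ===== CLAIM (what is proved, stated in full; the proofs are below) =====
def Claim_equal_evaluation_tensor_product : Prop := ∀ (pt : List Int), Dom_evaluation_tensor_product pt → Spec_evaluation_tensor_product pt (evaluation_tensor_product pt)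

-- ===== LEMMAS AND PROOFS =====

-- bit j of i is unchanged by adding 2^n, for j < n
theorem bit_add_pow (n k j : Nat) (hj : j < n) :
    ((2 ^ n + k) >>> j) &&& 1 = (k >>> j) &&& 1 := by
  simp only [Nat.shiftRight_eq_div_pow, Nat.and_one_is_mod]
  have h1 : 2 ^ n = 2 ^ j * 2 ^ (n - j) := by
    rw [← pow_add]; congr 1; omega
  have h2 : (2 ^ n + k) / 2 ^ j = 2 ^ (n - j) + k / 2 ^ j := by
    rw [h1, Nat.mul_comm, Nat.add_comm, Nat.add_mul_div_right _ _ (Nat.pow_pos (n := j) (by norm_num)), Nat.add_comm]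
  have h3 : 2 ^ (n - j) = 2 * 2 ^ (n - j - 1) := by
    rw [← pow_succ']; congr 1; omega
  rw [h2]; omega

theorem bit_lt_pow (n i : Nat) (hi : i < 2 ^ n) : (i >>> n) &&& 1 = 0 := by
  simp [Nat.shiftRight_eq_div_pow, Nat.and_one_is_mod, Nat.div_eq_of_lt hi]

theorem bit_top (n k : Nat) (hk : k < 2 ^ n) : ((2 ^ n + k) >>> n) &&& 1 = 1 := by
  simp only [Nat.shiftRight_eq_div_pow, Nat.and_one_is_mod]
  have : (2 ^ n + k) / 2 ^ n = 1 + k / 2 ^ n := by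
    rw [Nat.add_comm, Nat.add_div_right _ (Nat.pow_pos (n := n) (by norm_num))]; omega
  rw [this, Nat.div_eq_of_lt hk]

-- tpProd on pts ++ [c]: one extra factor determined by bit n
theorem tpProd_append (pts : List Int) (c : Int) (i : Nat) :
    tpProd (pts ++ [c]) i =
      tpProd pts i * (if (i >>> pts.length) &&& 1 == 1 then c else 1 - c) := by
  unfold tpProd
  rw [List.length_append, List.length_singleton, List.range_succ, List.foldl_append]
  simp only [List.foldl_cons, List.foldl_nil]
  have hgetn : (pts ++ [c]).getD pts.length 0 = c := by
    simp [List.getD]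
  rw [hgetn]
  congr 1
  refine PySem.List.foldl_congr_mem _ _ _ _ ?_
  intro acc j hj
  have hj' : j < pts.length := List.mem_range.mp hj
  have : (pts ++ [c]).getD j 0 = pts.getD j 0 := by
    simp [List.getD, List.getElem?_append_left hj']
  rw [this]

theorem main_eq (pt : List Int) :
    evaluation_tensor_product pt = evaluation_tensor_product_alt pt := by
  induction pt using List.reverseRecOn with
  | nil =>
      simp [evaluation_tensor_product, evaluation_tensor_product_alt, tpProd]
  | append_singleton pts c ih =>
      have hA : evaluation_tensor_product (pts ++ [c])
          = tpStep (evaluation_tensor_product pts) c := by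
        simp [evaluation_tensor_product, List.foldl_append]
      rw [hA, ih]
      unfold evaluation_tensor_product_alt tpStep
      set n := pts.length with hn
      have hlen : (pts ++ [c]).length = n + 1 := by simp [hn]
      have hpow : 1 <<< (n + 1) = 2 ^ n + 2 ^ n := by
        simp [Nat.shiftLeft_eq, pow_succ]; ring
      rw [hlen, hpow, List.range_add, List.map_append, List.map_map, List.map_map]
      have h1 : ∀ i ∈ List.range (2 ^ n),
          ((fun v => (1 - c) * v) ∘ fun i => tpProd pts i) i = tpProd (pts ++ [c]) i := by
        intro i hi
        have hi' := List.mem_range.mp hi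
        have hb : (i >>> n) &&& 1 = 0 := bit_lt_pow n i hi'
        rw [Function.comp_apply, tpProd_append, hb]
        simp [mul_comm]
      have h2 : ∀ k ∈ List.range (2 ^ n),
          ((fun i => tpProd (pts ++ [c]) i) ∘ fun k => 2 ^ n + k) k
            = ((fun v => c * v) ∘ fun i => tpProd pts i) k := by
        intro k hk
        have hk' := List.mem_range.mp hk
        have hb : ((2 ^ n + k) >>> n) &&& 1 = 1 := bit_top n k hk'
        have hbit : ∀ j < n, ((2 ^ n + k) >>> j) &&& 1 = (k >>> j) &&& 1 :=
          fun j hj => bit_add_pow n k j hj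
        simp only [Function.comp_apply]
        rw [tpProd_append, hb]
        have : tpProd pts (2 ^ n + k) = tpProd pts k := by
          unfold tpProd
          refine PySem.List.foldl_congr_mem _ _ _ _ ?_
          intro acc j hj
          rw [hbit j (List.mem_range.mp hj)]
        rw [this]; simp [mul_comm]
      have e1 : List.map ((fun v => (1 - c) * v) ∘ fun i => tpProd pts i) (List.range (2 ^ n))
          = List.map (fun i => tpProd (pts ++ [c]) i) (List.range (2 ^ n)) :=
        List.map_congr_left h1
      have e2 : List.map ((fun i => tpProd (pts ++ [c]) i) ∘ fun k => 2 ^ n + k) (List.range (2 ^ n))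
          = List.map ((fun v => c * v) ∘ fun i => tpProd pts i) (List.range (2 ^ n)) :=
        List.map_congr_left h2
      -- goal is LHS-step form = B(pts++[c]); rewrite both halves
      have hone : (1 : Nat) <<< n = 2 ^ n := by simp [Nat.shiftLeft_eq]
      rw [hone] at *
      simp only [List.map_map] at *
      rw [e1, ← e2]

-- ===== VERDICT (by name: the statement is the Claim_ definition above) =====
theorem evaluation_tensor_product_spec : Claim_equal_evaluation_tensor_product := by
  intro pt _
  unfold Spec_evaluation_tensor_product
  exact main_eq pt
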